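-- pv_equiv track=rewrite | github.com/vingamit/Coderun_2024_ML | problems/Medium/571.Marketplace_management/solution.py | calc_after_delivery
-- ===== SOURCE A (Python) =====
-- from typing import List
--
-- def calc_after_delivery(arr: List[int], curiers: int):
--     m = len(arr)
--
--     if sum(arr) <= curiers:
--         return [0] * len(arr)
--
--     while curiers > 0:
--         for j in range(m):
--             if arr[j] > 0:
--                 arr[j] -= 1
--                 curiers -= 1
--
--     return arr
-- ===== SOURCE B (Python) =====
-- from typing import List
--
-- # Water-filling: A performs full round-robin passes, each pass subtracting 1 from
-- # every positive element, until curiers <= 0 at a pass boundary.  So the result only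
-- # depends on the number p of full passes.  B binary-searches the smallest p whose
-- # total consumption sum(min(p, v) for positive v) reaches curiers, then applies it
-- # in one shot (alternative algorithm).  (A mutates arr in place; B leaves it untouched — return values agree.)
-- def calc_after_delivery(arr: List[int], curiers: int):
--     if sum(arr) <= curiers:
--         return [0] * len(arr)
--     if curiers <= 0:
--         return arr
--     lo, hi = 0, max(arr)
--     while lo < hi:
--         mid = (lo + hi) // 2
--         if sum(min(mid, v) for v in arr if v > 0) >= curiers:
--             hi = mid
--         else:
--             lo = mid + 1
--     return [max(v - lo, 0) if v > 0 else v for v in arr]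
-- ===== Notes on version B (the rewrite author's own statement) =====
-- stated objective: alternative
-- what changed: Replaces the simulated round-robin decrement passes with a binary search for the number of full passes (water-filling level) followed by a single map applying that level.
import Mathlib
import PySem

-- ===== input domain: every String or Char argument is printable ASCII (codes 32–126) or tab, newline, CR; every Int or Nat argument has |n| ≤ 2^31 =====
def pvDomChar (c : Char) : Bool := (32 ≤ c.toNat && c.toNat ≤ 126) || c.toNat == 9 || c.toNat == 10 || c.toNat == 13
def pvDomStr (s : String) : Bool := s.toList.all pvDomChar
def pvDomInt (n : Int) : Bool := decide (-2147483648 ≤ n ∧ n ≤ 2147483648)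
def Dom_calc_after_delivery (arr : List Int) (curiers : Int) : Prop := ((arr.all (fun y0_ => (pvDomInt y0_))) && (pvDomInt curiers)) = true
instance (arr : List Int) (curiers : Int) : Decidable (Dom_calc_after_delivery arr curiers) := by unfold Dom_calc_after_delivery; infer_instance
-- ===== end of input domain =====

-- B replaces A's simulated round-robin decrement passes with a binary search for the
-- pass count (water-filling level), a genuinely different algorithm of similar cost;
-- A mutates arr in place, the equivalence proved here is about the return value only.


-- ===== PORT A =====
-- the inner `for j in range(m)` loop of A: one left-to-right pass over arr,
-- decrementing each positive element and curiers with it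
def pvPassA : List Int → Int → (List Int × Int)
  | [], c => ([], c)
  | v :: rest, c =>
    if v > 0 then
      let r := pvPassA rest (c - 1)
      ((v - 1) :: r.1, r.2)
    else
      let r := pvPassA rest c
      (v :: r.1, r.2)

-- needed by pvLoopA's decreasing_by
theorem pvPassA_eq (arr : List Int) (c : Int) :
    pvPassA arr c = (arr.map (fun v => if v > 0 then v - 1 else v),
                     c - (arr.countP (fun v => decide (v > 0)) : Int)) := by
  induction arr generalizing c with
  | nil => simp [pvPassA]
  | cons v rest ih =>
    by_cases h : v > 0 <;> simp [pvPassA, h, ih] <;> push_cast <;> ring_nf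

-- the `while curiers > 0` loop of A.  When no element is positive Python would loop
-- forever; that state is unreachable from calc_after_delivery's else-branch, and the
-- guard below only serves to make the recursion total.
def pvLoopA (arr : List Int) (c : Int) : List Int :=
  if hc : 0 < c then
    if hp : arr.any (fun v => decide (0 < v)) then
      let r := pvPassA arr c
      pvLoopA r.1 r.2
    else arr
  else arr
termination_by c.toNat
decreasing_by
  simp only [pvPassA_eq]
  have h1 : 0 < arr.countP (fun v => decide (v > 0)) := by
    rw [List.countP_pos_iff]
    simpa using hp
  omega

def calc_after_delivery (arr : List Int) (curiers : Int) : List Int :=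
  if arr.sum ≤ curiers then List.replicate arr.length 0
  else pvLoopA arr curiers

-- ===== PORT B =====
-- sum(min(mid, v) for v in arr if v > 0)
def pvConsumed (arr : List Int) (p : Int) : Int :=
  ((arr.filter (fun v => decide (0 < v))).map (fun v => min p v)).sum

-- needed by pvBsearch's decreasing_by
theorem pvMid_bounds (lo hi : Int) (h : lo < hi) :
    lo ≤ PySem.Int.floordiv (lo + hi) 2 ∧ PySem.Int.floordiv (lo + hi) 2 < hi := by
  rw [PySem.Int.floordiv_eq_ediv_of_pos (by omega : (0:Int) < 2)]
  omega

-- the `while lo < hi` binary search of B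
def pvBsearch (arr : List Int) (c : Int) (lo hi : Int) : Int :=
  if h : lo < hi then
    let mid := PySem.Int.floordiv (lo + hi) 2
    if c ≤ pvConsumed arr mid then pvBsearch arr c lo mid
    else pvBsearch arr c (mid + 1) hi
  else lo
termination_by (hi - lo).toNat
decreasing_by
  · have := pvMid_bounds lo hi h; omega
  · have := pvMid_bounds lo hi h; omega

def calc_after_delivery_alt (arr : List Int) (curiers : Int) : List Int :=
  if arr.sum ≤ curiers then List.replicate arr.length 0
  else if curiers ≤ 0 then arr
  else
    match PySem.List.max? arr (fun v => v) with
    | none => arr   -- unreachable: arr = [] has sum 0 ≤ curiers; guard only for totality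
    | some mx =>
      let p := pvBsearch arr curiers 0 mx
      arr.map (fun v => if 0 < v then max (v - p) 0 else v)

-- ===== PRECONDITION & SPEC =====
def Spec_calc_after_delivery (arr : List Int) (curiers : Int) (out : List Int) : Prop := out = calc_after_delivery_alt arr curiers
instance (arr : List Int) (curiers : Int) (out : List Int) : Decidable (Spec_calc_after_delivery arr curiers out) := by unfold Spec_calc_after_delivery; infer_instance

-- ===== CLAIM (what is proved, stated in full; the proofs are below) =====
def Claim_equal_calc_after_delivery : Prop := ∀ (arr : List Int) (curiers : Int), Dom_calc_after_delivery arr curiers → Spec_calc_after_delivery arr curiers (calc_after_delivery arr curiers)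

-- ===== LEMMAS AND PROOFS =====

-- total positive mass of arr
def pvSumPos (arr : List Int) : Int := (arr.map (fun v => max v 0)).sum

theorem pvSumPos_cons (x : Int) (l : List Int) :
    pvSumPos (x :: l) = max x 0 + pvSumPos l := by
  simp [pvSumPos]

theorem pvConsumed_cons (x : Int) (l : List Int) (n : Int) :
    pvConsumed (x :: l) n = (if 0 < x then min n x else 0) + pvConsumed l n := by
  by_cases h : (0:Int) < x <;> simp [pvConsumed, h]

theorem pvSumPos_ge_sum (arr : List Int) : arr.sum ≤ pvSumPos arr := by
  induction arr with
  | nil => simp [pvSumPos]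
  | cons v rest ih => rw [pvSumPos_cons]; simp only [List.sum_cons]; omega

theorem pvConsumed_zero (arr : List Int) : pvConsumed arr 0 = 0 := by
  induction arr with
  | nil => simp [pvConsumed]
  | cons v rest ih => rw [pvConsumed_cons, ih]; split_ifs with h <;> omega

theorem pvConsumed_mono (arr : List Int) {k m : Int} (h : k ≤ m) :
    pvConsumed arr k ≤ pvConsumed arr m := by
  induction arr with
  | nil => simp [pvConsumed]
  | cons v rest ih => rw [pvConsumed_cons, pvConsumed_cons]; split_ifs with h' <;> omega

theorem pvConsumed_top (arr : List Int) {mx : Int} (h : ∀ v ∈ arr, v ≤ mx) :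
    pvConsumed arr mx = pvSumPos arr := by
  induction arr with
  | nil => simp [pvConsumed, pvSumPos]
  | cons v rest ih =>
    have hv := h v (by simp)
    have ih' := ih (fun w hw => h w (by simp [hw]))
    rw [pvConsumed_cons, pvSumPos_cons, ih']
    split_ifs with h0 <;> omega

theorem pvSumPos_pos_exists (arr : List Int) (h : 0 < pvSumPos arr) :
    ∃ v ∈ arr, (0:Int) < v := by
  induction arr with
  | nil => simp [pvSumPos] at h
  | cons v rest ih =>
    by_cases hv : (0:Int) < v
    · exact ⟨v, by simp, hv⟩
    · rw [pvSumPos_cons] at h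
      rcases ih (by omega) with ⟨w, hw, hw0⟩
      exact ⟨w, by simp [hw], hw0⟩

theorem pvSumPos_pass (arr : List Int) :
    pvSumPos (arr.map (fun v => if v > 0 then v - 1 else v))
      = pvSumPos arr - (arr.countP (fun v => decide (v > 0)) : Int) := by
  induction arr with
  | nil => simp [pvSumPos]
  | cons v rest ih =>
    simp only [List.map_cons, List.countP_cons]
    rw [pvSumPos_cons, pvSumPos_cons, ih]
    by_cases h : v > 0 <;> simp [h] <;> push_cast <;> omega

theorem pvConsumed_pass (arr : List Int) (n : Int) (hn : 0 ≤ n) :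
    pvConsumed (arr.map (fun v => if v > 0 then v - 1 else v)) n
      = pvConsumed arr (n + 1) - (arr.countP (fun v => decide (v > 0)) : Int) := by
  induction arr with
  | nil => simp [pvConsumed]
  | cons v rest ih =>
    simp only [List.map_cons, List.countP_cons]
    rw [pvConsumed_cons, pvConsumed_cons, ih]
    by_cases h : v > 0 <;> simp [h] <;> split_ifs <;> push_cast <;> omega

theorem pvApply_pass (arr : List Int) (p : Int) (hp : 1 ≤ p) :
    (arr.map (fun v => if v > 0 then v - 1 else v)).map
        (fun v => if 0 < v then max (v - (p - 1)) 0 else v)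
      = arr.map (fun v => if 0 < v then max (v - p) 0 else v) := by
  induction arr with
  | nil => simp
  | cons v rest ih =>
    simp only [List.map_cons, ih]
    by_cases h : v > 0
    · by_cases h1 : (0:Int) < v - 1 <;> simp [h, h1] <;> omega
    · simp [h]

-- main characterisation of A's while loop: given the invariant c < pvSumPos arr and a
-- water level p that is the first level consuming at least c, the loop equals one map.
theorem pvLoopA_eq : ∀ (n : ℕ) (p : Int), p.toNat = n → ∀ (arr : List Int) (c : Int),
    c < pvSumPos arr → 0 ≤ p →
    (∀ k, 0 ≤ k → k < p → pvConsumed arr k < c) →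
    c ≤ pvConsumed arr p →
    pvLoopA arr c = arr.map (fun v => if 0 < v then max (v - p) 0 else v) := by
  intro n
  induction n with
  | zero =>
    intro p hpn arr c hinv hp0 hlt hge
    have hp : p = 0 := by omega
    subst hp
    have hc : c ≤ 0 := by
      have := pvConsumed_zero arr; omega
    rw [pvLoopA.eq_def]
    simp only [dif_neg (by omega : ¬ (0:Int) < c)]
    have hmap : ∀ (l : List Int),
        l.map (fun v => if 0 < v then max (v - 0) 0 else v) = l := by
      intro l
      induction l with
      | nil => simp
      | cons x t iht =>
        simp only [List.map_cons, iht]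
        congr 1
        split_ifs <;> omega
    exact (hmap arr).symm
  | succ n ih =>
    intro p hpn arr c hinv hp0 hlt hge
    by_cases hc : 0 < c
    · -- one pass, then the induction hypothesis at level p - 1
      have hppos : 1 ≤ p := by
        by_contra h
        have hp : p = 0 := by omega
        subst hp
        have := pvConsumed_zero arr
        omega
      have hex : ∃ v ∈ arr, (0:Int) < v :=
        pvSumPos_pos_exists arr (by omega)
      have hany : arr.any (fun v => decide (0 < v)) = true := by
        rcases hex with ⟨v, hv, hv0⟩
        simp only [List.any_eq_true]
        exact ⟨v, hv, by simpa using hv0⟩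
      rw [pvLoopA.eq_def]
      simp only [dif_pos hc, dif_pos hany, pvPassA_eq]
      set cnt : Int := (arr.countP (fun v => decide (v > 0)) : Int) with hcnt
      have hrec := ih (p - 1) (by omega)
        (arr.map (fun v => if v > 0 then v - 1 else v)) (c - cnt)
        (by rw [pvSumPos_pass]; omega)
        (by omega)
        (by
          intro k hk0 hk
          rw [pvConsumed_pass arr k hk0]
          have := hlt (k + 1) (by omega) (by omega)
          omega)
        (by
          rw [pvConsumed_pass arr (p - 1) (by omega)]
          simp only [sub_add_cancel]
          omega)
      rw [hrec, pvApply_pass arr p hppos]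
    · -- the loop does not run; p must be 0
      have hp : p = 0 := by
        by_contra h
        have := hlt 0 le_rfl (by omega)
        have := pvConsumed_zero arr
        omega
      subst hp
      rw [pvLoopA.eq_def]
      simp only [dif_neg hc]
      have hmap : ∀ (l : List Int),
          l.map (fun v => if 0 < v then max (v - 0) 0 else v) = l := by
        intro l
        induction l with
        | nil => simp
        | cons x t iht =>
          simp only [List.map_cons, iht]
          congr 1
          split_ifs <;> omega
      exact (hmap arr).symm

-- correctness of the binary search: it returns the least level reaching c
theorem pvBsearch_spec (arr : List Int) (c : Int) : ∀ (n : ℕ) (lo hi : Int),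
    (hi - lo).toNat = n → 0 ≤ lo → lo ≤ hi →
    (∀ k, 0 ≤ k → k < lo → pvConsumed arr k < c) →
    c ≤ pvConsumed arr hi →
    0 ≤ pvBsearch arr c lo hi ∧
    (∀ k, 0 ≤ k → k < pvBsearch arr c lo hi → pvConsumed arr k < c) ∧
    c ≤ pvConsumed arr (pvBsearch arr c lo hi) := by
  intro n
  induction n using Nat.strong_induction_on with
  | _ n ih =>
    intro lo hi hn hlo0 hlohi hlow hhigh
    by_cases h : lo < hi
    · rw [pvBsearch.eq_def]
      simp only [dif_pos h]
      have hmid := pvMid_bounds lo hi h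
      set mid := PySem.Int.floordiv (lo + hi) 2 with hmiddef
      by_cases hb : c ≤ pvConsumed arr mid
      · simp only [if_pos hb]
        exact ih (mid - lo).toNat (by omega) lo mid rfl hlo0 (by omega) hlow hb
      · simp only [if_neg hb]
        refine ih (hi - (mid + 1)).toNat (by omega) (mid + 1) hi rfl (by omega) (by omega) ?_ hhigh
        intro k hk0 hk
        by_cases hkl : k < lo
        · exact hlow k hk0 hkl
        · have : pvConsumed arr k ≤ pvConsumed arr mid :=
            pvConsumed_mono arr (by omega)
          omega
    · rw [pvBsearch.eq_def]
      simp only [dif_neg h]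
      have : lo = hi := by omega
      subst this
      exact ⟨hlo0, hlow, hhigh⟩

theorem pv_main (arr : List Int) (curiers : Int) :
    calc_after_delivery arr curiers = calc_after_delivery_alt arr curiers := by
  unfold calc_after_delivery calc_after_delivery_alt
  by_cases h1 : arr.sum ≤ curiers
  · simp [h1]
  · simp only [if_neg h1]
    by_cases h2 : curiers ≤ 0
    · simp only [if_pos h2]
      rw [pvLoopA.eq_def]
      simp [show ¬ (0:Int) < curiers by omega]
    · simp only [if_neg h2]
      have hsum : curiers < arr.sum := by omega
      have hinv : curiers < pvSumPos arr := lt_of_lt_of_le hsum (pvSumPos_ge_sum arr)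
      have hne : arr ≠ [] := by
        intro he; subst he; simp at hsum; omega
      rcases hmx : PySem.List.max? arr (fun v => v) with _ | mx
      · exact absurd ((PySem.List.max?_eq_none_iff arr (fun v => v)).mp hmx) hne
      · simp only []
        have hub : ∀ v ∈ arr, v ≤ mx := by
          intro v hv
          exact PySem.List.max?_isMax hmx v hv
        have htop : curiers ≤ pvConsumed arr mx := by
          rw [pvConsumed_top arr hub]; omega
        have hmx0 : 0 ≤ mx := by
          rcases pvSumPos_pos_exists arr (by omega) with ⟨v, hv, hv0⟩
          have := hub v hv; omega
        have hbs := pvBsearch_spec arr curiers (mx - 0).toNat 0 mx rfl le_rfl hmx0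
          (by intro k hk0 hk; omega) htop
        exact pvLoopA_eq (pvBsearch arr curiers 0 mx).toNat _ rfl arr curiers
          hinv hbs.1 hbs.2.1 hbs.2.2

-- ===== VERDICT (by name: the statement is the Claim_ definition above) =====
theorem calc_after_delivery_spec : Claim_equal_calc_after_delivery := by
  intro arr curiers _
  unfold Spec_calc_after_delivery
  exact pv_main arr curiers
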